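-- pv_equiv track=rewrite | github.com/BrandonTang89/Competitive_Programming_4_Solutions | Other_Tasks/kattis_gatheringinyorknew.py | f
-- ===== SOURCE A (Python) =====
-- def f(arr):
--     arr.sort()
--     n = len(arr)
--     prefix = [0] * (n + 1) # prefix[i] = sum(arr[:i])
--     for i in range(1, n + 1):
--         prefix[i] = prefix[i - 1] + arr[i - 1]
--
--     def rangeSum(i, j): # sum(arr[i:j])
--         return prefix[j] - prefix[i]
--
--     mini = rangeSum(0, n)
--     # all people < b will go directly to the left
--     # b .. i will go to the portal rightwards
--     # i+1 .. will go to the portal leftwards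
--     b = 0
--     for i in range(n):
--         # suppose the portal is at arr[i]
--         c = arr[i]
--         while b < n and c - arr[b] > arr[b]:
--             b += 1
--         # now c - arr[b] <= arr[b] so b will rather go right to the portal
--
--         cur = rangeSum(0, b) + (c*(i - b + 1) - rangeSum(b, i + 1)) + (rangeSum(i + 1, n) - c*(n - i - 1)) # current cost
--         mini = min(mini, cur)
--
--     return mini
-- ===== SOURCE B (Python) =====
-- def f(arr):
--     # For a portal at c, a person at x left of the portal pays min(x, c - x)
--     # (walk left to the origin, or right to the portal); a person right of it
--     # pays x - c.  Evaluate that definition directly for every candidate portal.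
--     s = sorted(arr)
--     best = sum(s)
--     for i, c in enumerate(s):
--         cost = sum(min(x, c - x) if j <= i else x - c for j, x in enumerate(s))
--         best = min(best, cost)
--     return best
-- ===== Notes on version B (the rewrite author's own statement) =====
-- stated objective: simpler
-- what changed: B drops A's prefix-sum table and carried two-pointer split entirely and instead evaluates the cost definition directly: for each candidate portal it sums every person's individual min-cost in one inner pass (O(n^2) but much shorter and self-evidently the problem statement); B also does not mutate its argument.
import Mathlib
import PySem

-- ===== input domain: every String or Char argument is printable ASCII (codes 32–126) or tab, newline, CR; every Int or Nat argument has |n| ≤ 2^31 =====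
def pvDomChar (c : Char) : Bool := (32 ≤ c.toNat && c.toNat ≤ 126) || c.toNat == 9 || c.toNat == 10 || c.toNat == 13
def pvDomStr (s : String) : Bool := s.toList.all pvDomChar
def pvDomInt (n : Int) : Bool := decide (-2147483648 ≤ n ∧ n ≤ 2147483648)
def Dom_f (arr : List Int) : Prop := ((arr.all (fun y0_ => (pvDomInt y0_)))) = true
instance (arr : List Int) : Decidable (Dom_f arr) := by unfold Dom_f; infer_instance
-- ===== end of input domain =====

-- B replaces A's prefix-sum table and carried two-pointer with a direct per-portal sum of each
-- person's individual min-cost; equivalence is about the RETURN value only (Python A sorts its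
-- argument in place, B does not mutate it).

-- ===== PORT A =====
-- A's inner `while b < n and c - arr[b] > arr[b]: b += 1`; indices are provably in range,
-- so `getD _ 0` is exact here.
def fAdv (s : List Int) (c : Int) (b : Nat) : Nat :=
  if h : b < s.length ∧ c - s.getD b 0 > s.getD b 0 then fAdv s c (b + 1) else b
termination_by s.length - b
decreasing_by omega

def f (arr : List Int) : Int :=
  let s := PySem.List.sorted arr (fun x => x) false   -- arr.sort()
  let n := s.length
  -- for i in range(1, n+1): prefix[i] = prefix[i-1] + arr[i-1]
  let pref := (List.range' 1 n).foldl (fun p i => p ++ [p.getD (i - 1) 0 + s.getD (i - 1) 0]) [0]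
  let rangeSum := fun (i j : Nat) => pref.getD j 0 - pref.getD i 0
  let mini := rangeSum 0 n
  let st := (List.range n).foldl (fun (st : Nat × Int) i =>
      let c := s.getD i 0
      let b := fAdv s c st.1
      let cur := rangeSum 0 b + (c * ((i : Int) - (b : Int) + 1) - rangeSum b (i + 1))
                 + (rangeSum (i + 1) n - c * ((n : Int) - (i : Int) - 1))
      (b, min st.2 cur)) (0, mini)
  st.2

-- ===== PORT B =====
def f_alt (arr : List Int) : Int :=
  let s := PySem.List.sorted arr (fun x => x) false   -- s = sorted(arr)
  let best := s.sum                                   -- best = sum(s)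
  -- for i, c in enumerate(s): cost = sum(min(x, c-x) if j <= i else x - c ...); best = min(best, cost)
  (PySem.List.enumerate s).foldl (fun best ic =>
      let cost := ((PySem.List.enumerate s).map (fun jx =>
          if jx.1 ≤ ic.1 then min jx.2 (ic.2 - jx.2) else jx.2 - ic.2)).sum
      min best cost) best

-- ===== PRECONDITION & SPEC =====
def Spec_f (arr : List Int) (out : Int) : Prop := out = f_alt arr
instance (arr : List Int) (out : Int) : Decidable (Spec_f arr out) := by unfold Spec_f; infer_instance

-- ===== CLAIM (what is proved, stated in full; the proofs are below) =====
def Claim_equal_f : Prop := ∀ (arr : List Int), Dom_f arr → Spec_f arr (f arr)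

-- ===== LEMMAS AND PROOFS =====

-- partial sum of the first k elements
def S (s : List Int) (k : Nat) : Int := ∑ j ∈ Finset.range k, s.getD j 0

-- number of leading elements of s with 2*x < c (for sorted s, A's settled split point)
def cntLt (s : List Int) (c : Int) : Nat := (s.takeWhile (fun x => decide (2 * x < c))).length

-- A's per-portal cost, in A's own shape (b = the settled two-pointer value)
def FA (s : List Int) (i : Nat) : Int :=
  (S s (cntLt s (s.getD i 0)) - S s 0)
    + (s.getD i 0 * ((i : Int) - (cntLt s (s.getD i 0) : Int) + 1)
        - (S s (i + 1) - S s (cntLt s (s.getD i 0))))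
    + ((S s s.length - S s (i + 1)) - s.getD i 0 * ((s.length : Int) - (i : Int) - 1))

-- B's per-portal cost: sum of each person's own min-cost
def FB (s : List Int) (i : Nat) : Int :=
  ∑ j ∈ Finset.range s.length,
    (if j ≤ i then min (s.getD j 0) (s.getD i 0 - s.getD j 0) else s.getD j 0 - s.getD i 0)

theorem cntLt_le_length (s : List Int) (c : Int) : cntLt s c ≤ s.length :=
  (List.takeWhile_sublist _).length_le

theorem cntLt_pred (s : List Int) (c : Int) : ∀ j, j < cntLt s c → 2 * s.getD j 0 < c := by
  induction s with
  | nil => simp [cntLt]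
  | cons x t ih =>
    intro j hj
    by_cases hx : 2 * x < c
    · cases j with
      | zero => simpa using hx
      | succ j =>
        simp [cntLt, List.takeWhile, hx] at hj
        exact ih j (by simpa [cntLt] using hj)
    · simp [cntLt, List.takeWhile, hx] at hj

theorem cntLt_boundary (s : List Int) (c : Int) (h : cntLt s c < s.length) :
    ¬ (2 * s.getD (cntLt s c) 0 < c) := by
  induction s with
  | nil => simp at h
  | cons x t ih =>
    by_cases hx : 2 * x < c
    · have hc : cntLt (x :: t) c = cntLt t c + 1 := by simp [cntLt, List.takeWhile, hx]
      rw [hc] at h ⊢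
      simp only [List.length_cons] at h
      simpa using ih (by omega)
    · have hc : cntLt (x :: t) c = 0 := by simp [cntLt, List.takeWhile, hx]
      rw [hc]
      simpa using hx

theorem cntLt_mono (s : List Int) {c c' : Int} (h : c ≤ c') : cntLt s c ≤ cntLt s c' := by
  induction s with
  | nil => simp [cntLt]
  | cons x t ih =>
    by_cases hx : 2 * x < c
    · have hx' : 2 * x < c' := lt_of_lt_of_le hx h
      simp [cntLt, List.takeWhile, hx, hx'] at ih ⊢; omega
    · simp [cntLt, List.takeWhile, hx]

theorem cntLt_ge (s : List Int) (c : Int) (k : Nat) (hk : k ≤ s.length)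
    (h : ∀ j, j < k → 2 * s.getD j 0 < c) : k ≤ cntLt s c := by
  by_contra hlt
  exact cntLt_boundary s c (by omega) (h _ (by omega))

theorem sorted_getD_mono {s : List Int} (hs : s.Pairwise (· ≤ ·)) {i j : Nat}
    (hij : i ≤ j) (hj : j < s.length) : s.getD i 0 ≤ s.getD j 0 := by
  rcases eq_or_lt_of_le hij with rfl | hlt
  · exact le_refl _
  · have := (List.pairwise_iff_getElem.1 hs) i j (by omega) hj hlt
    rw [List.getD_eq_getElem s 0 (by omega), List.getD_eq_getElem s 0 hj]
    exact this

theorem fAdv_eq_fuel (s : List Int) (c : Int) :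
    ∀ k b, s.length - b ≤ k → b ≤ cntLt s c → fAdv s c b = cntLt s c := by
  intro k
  induction k with
  | zero =>
    intro b hk hb
    have hble : cntLt s c ≤ s.length := cntLt_le_length s c
    have hb' : b = cntLt s c := by omega
    subst hb'
    rw [fAdv, dif_neg]
    rintro ⟨h1, h2⟩
    exact cntLt_boundary s c h1 (by omega)
  | succ k ih =>
    intro b hk hb
    rw [fAdv]
    split_ifs with h
    · have hblt : b < cntLt s c := by
        by_contra hge
        have hbe : b = cntLt s c := le_antisymm hb (not_lt.mp hge)
        rw [hbe] at h
        exact cntLt_boundary s c h.1 (by omega)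
      exact ih (b + 1) (by omega) (by omega)
    · rcases lt_or_eq_of_le hb with h' | rfl
      · have hlen : b < s.length := lt_of_lt_of_le h' (cntLt_le_length s c)
        have := cntLt_pred s c b h'
        omega
      · rfl

theorem fAdv_eq (s : List Int) (c : Int) (b : Nat) (hb : b ≤ cntLt s c) :
    fAdv s c b = cntLt s c :=
  fAdv_eq_fuel s c (s.length - b) b le_rfl hb

theorem S_zero (s : List Int) : S s 0 = 0 := by simp [S]

theorem S_succ (s : List Int) (k : Nat) : S s (k + 1) = S s k + s.getD k 0 := by
  simp [S, Finset.sum_range_succ]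

theorem S_length (s : List Int) : S s s.length = s.sum := by
  induction s with
  | nil => simp [S]
  | cons x t ih =>
    simp only [S, List.length_cons]
    rw [Finset.sum_range_succ']
    simp only [List.getD_cons_succ, List.getD_cons_zero]
    rw [List.sum_cons, ← ih, S, add_comm]

-- the prefix list built by port A is the table of partial sums
theorem prefA_eq (s : List Int) : ∀ m, m ≤ s.length →
    (List.range' 1 m).foldl (fun p i => p ++ [p.getD (i - 1) 0 + s.getD (i - 1) 0]) [0]
      = (List.range (m + 1)).map (fun k => S s k) := by
  intro m
  induction m with
  | zero => simp [S]
  | succ m ih =>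
    intro hm
    rw [List.range'_1_concat, List.foldl_append, ih (by omega)]
    simp only [List.foldl_cons, List.foldl_nil]
    have he : 1 + m - 1 = m := by omega
    have hget : ((List.range (m + 1)).map (fun k => S s k)).getD m 0 = S s m := by
      rw [List.getD_eq_getElem _ 0 (by simp)]
      simp
    rw [he, hget, List.range_succ (n := m + 1), List.map_append]
    simp [S_succ]

theorem getD_map_range_S (s : List Int) (m k : Nat) (hk : k ≤ m) :
    ((List.range (m + 1)).map (fun k => S s k)).getD k 0 = S s k := by
  rw [List.getD_eq_getElem _ 0 (by simp; omega)]
  simp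

-- foldl-min facts
theorem foldl_min_le_init (g : Nat → Int) (l : List Nat) (a : Int) :
    List.foldl (fun m i => min m (g i)) a l ≤ a := by
  induction l generalizing a with
  | nil => simp
  | cons x t ih => exact le_trans (ih _) (by simp)

theorem foldl_min_le_mem (g : Nat → Int) (l : List Nat) (a : Int) {i : Nat} (hi : i ∈ l) :
    List.foldl (fun m i => min m (g i)) a l ≤ g i := by
  induction l generalizing a with
  | nil => simp at hi
  | cons x t ih =>
    rcases List.mem_cons.1 hi with rfl | hi'
    · exact le_trans (foldl_min_le_init g t _) (min_le_right _ _)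
    · exact ih _ hi'

theorem le_foldl_min (g : Nat → Int) (l : List Nat) (a x : Int) (ha : x ≤ a)
    (h : ∀ i ∈ l, x ≤ g i) : x ≤ List.foldl (fun m i => min m (g i)) a l := by
  induction l generalizing a with
  | nil => simpa
  | cons y t ih =>
    exact ih _ (le_min ha (h y (List.mem_cons_self))) (fun i hi => h i (List.mem_cons_of_mem _ hi))

theorem foldl_min_eq (g h : Nat → Int) (l : List Nat) (a : Int)
    (h1 : ∀ i ∈ l, g i ≤ h i) (h2 : ∀ i ∈ l, ∃ i' ∈ l, h i' ≤ g i) :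
    List.foldl (fun m i => min m (g i)) a l = List.foldl (fun m i => min m (h i)) a l := by
  apply le_antisymm
  · apply le_foldl_min
    · exact foldl_min_le_init g l a
    · intro i hi
      exact le_trans (foldl_min_le_mem g l a hi) (h1 i hi)
  · apply le_foldl_min
    · exact foldl_min_le_init h l a
    · intro i hi
      obtain ⟨i', hi', hle⟩ := h2 i hi
      exact le_trans (foldl_min_le_mem h l a hi') hle

-- A's loop (carried pointer + prefix table lookups) computes foldl-min of FA
theorem loopA (s P : List Int) (hs : s.Pairwise (· ≤ ·))
    (hP : ∀ k, k ≤ s.length → P.getD k 0 = S s k) :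
    ∀ (k a b : Nat) (m : Int), a + k ≤ s.length →
    (k = 0 ∨ b ≤ cntLt s (s.getD a 0)) →
    (List.foldl (fun (st : Nat × Int) i =>
        (fAdv s (s.getD i 0) st.1,
         min st.2 ((P.getD (fAdv s (s.getD i 0) st.1) 0 - P.getD 0 0)
           + (s.getD i 0 * ((i : Int) - (fAdv s (s.getD i 0) st.1 : Int) + 1)
               - (P.getD (i + 1) 0 - P.getD (fAdv s (s.getD i 0) st.1) 0))
           + ((P.getD s.length 0 - P.getD (i + 1) 0)
               - s.getD i 0 * ((s.length : Int) - (i : Int) - 1)))))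
      (b, m) (List.range' a k)).2
    = List.foldl (fun m i => min m (FA s i)) m (List.range' a k) := by
  intro k
  induction k with
  | zero => intro a b m _ _; rfl
  | succ k ih =>
    intro a b m hlen hb
    have hb' : b ≤ cntLt s (s.getD a 0) := by
      rcases hb with h | h
      · omega
      · exact h
    have hAdv : fAdv s (s.getD a 0) b = cntLt s (s.getD a 0) := fAdv_eq s _ b hb'
    rw [List.range'_succ]
    simp only [List.foldl_cons, hAdv]
    have hcur : (P.getD (cntLt s (s.getD a 0)) 0 - P.getD 0 0)
        + (s.getD a 0 * ((a : Int) - (cntLt s (s.getD a 0) : Int) + 1)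
            - (P.getD (a + 1) 0 - P.getD (cntLt s (s.getD a 0)) 0))
        + ((P.getD s.length 0 - P.getD (a + 1) 0)
            - s.getD a 0 * ((s.length : Int) - (a : Int) - 1)) = FA s a := by
      rw [hP _ (cntLt_le_length s _), hP 0 (by omega), hP (a + 1) (by omega),
        hP s.length le_rfl]
      rfl
    rw [hcur]
    have hnext : k = 0 ∨ cntLt s (s.getD a 0) ≤ cntLt s (s.getD (a + 1) 0) := by
      rcases Nat.eq_zero_or_pos k with hk | hk
      · exact Or.inl hk
      · exact Or.inr (cntLt_mono s (sorted_getD_mono hs (by omega) (by omega)))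
    exact ih (a + 1) (cntLt s (s.getD a 0)) (min m (FA s a)) (by omega) hnext

-- difference of partial sums is a sum over Ico
theorem S_sub (s : List Int) {a b : Nat} (hab : a ≤ b) :
    S s b - S s a = ∑ j ∈ Finset.Ico a b, s.getD j 0 := by
  rw [S, S, Finset.range_eq_Ico,
    ← Finset.sum_Ico_consecutive (fun j => s.getD j 0) (Nat.zero_le a) hab]
  ring

-- closed form of FB: split the people at b' = min (cntLt s c) (i+1)
theorem FB_closed (s : List Int) (hs : s.Pairwise (· ≤ ·)) (i : Nat) (hi : i < s.length) :
    FB s i = 2 * S s (min (cntLt s (s.getD i 0)) (i + 1)) - 2 * S s (i + 1) + S s s.length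
      + s.getD i 0 * ((i : Int) + 1 - ((min (cntLt s (s.getD i 0)) (i + 1) : Nat) : Int))
      - s.getD i 0 * ((s.length : Int) - (i : Int) - 1) := by
  set c := s.getD i 0 with hc
  set b' := min (cntLt s c) (i + 1) with hb'
  have hb'i : b' ≤ i + 1 := min_le_right _ _
  have hin : i + 1 ≤ s.length := hi
  have hsplit : FB s i
      = (∑ j ∈ Finset.Ico 0 b', (if j ≤ i then min (s.getD j 0) (c - s.getD j 0) else s.getD j 0 - c))
      + (∑ j ∈ Finset.Ico b' (i + 1), (if j ≤ i then min (s.getD j 0) (c - s.getD j 0) else s.getD j 0 - c))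
      + (∑ j ∈ Finset.Ico (i + 1) s.length, (if j ≤ i then min (s.getD j 0) (c - s.getD j 0) else s.getD j 0 - c)) := by
    rw [FB, Finset.range_eq_Ico,
      ← Finset.sum_Ico_consecutive _ (Nat.zero_le (i + 1)) hin,
      ← Finset.sum_Ico_consecutive _ (Nat.zero_le b') hb'i]
  have h1 : (∑ j ∈ Finset.Ico 0 b', (if j ≤ i then min (s.getD j 0) (c - s.getD j 0) else s.getD j 0 - c))
      = S s b' - S s 0 := by
    rw [S_sub s (Nat.zero_le b')]
    apply Finset.sum_congr rfl
    intro j hj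
    simp only [Finset.mem_Ico] at hj
    have h2j : 2 * s.getD j 0 < c := cntLt_pred s c j (by omega)
    rw [if_pos (by omega), min_eq_left (by omega)]
  have h2 : (∑ j ∈ Finset.Ico b' (i + 1), (if j ≤ i then min (s.getD j 0) (c - s.getD j 0) else s.getD j 0 - c))
      = ((i + 1 - b' : Nat) : Int) * c - (S s (i + 1) - S s b') := by
    have hcongr : ∀ j ∈ Finset.Ico b' (i + 1),
        (if j ≤ i then min (s.getD j 0) (c - s.getD j 0) else s.getD j 0 - c) = c - s.getD j 0 := by
      intro j hj
      simp only [Finset.mem_Ico] at hj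
      have hbm : b' = min (cntLt s c) (i + 1) := rfl
      have hbc : cntLt s c ≤ j := by omega
      have hblen : cntLt s c < s.length := by omega
      have hbd := cntLt_boundary s c hblen
      have hmono := sorted_getD_mono hs hbc (by omega)
      rw [if_pos (by omega), min_eq_right (by omega)]
    rw [Finset.sum_congr rfl hcongr, Finset.sum_sub_distrib, Finset.sum_const, Nat.card_Ico,
      S_sub s hb'i, nsmul_eq_mul]
  have h3 : (∑ j ∈ Finset.Ico (i + 1) s.length, (if j ≤ i then min (s.getD j 0) (c - s.getD j 0) else s.getD j 0 - c))
      = (S s s.length - S s (i + 1)) - ((s.length - (i + 1) : Nat) : Int) * c := by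
    have hcongr : ∀ j ∈ Finset.Ico (i + 1) s.length,
        (if j ≤ i then min (s.getD j 0) (c - s.getD j 0) else s.getD j 0 - c) = s.getD j 0 - c := by
      intro j hj
      simp only [Finset.mem_Ico] at hj
      rw [if_neg (by omega)]
    rw [Finset.sum_congr rfl hcongr, Finset.sum_sub_distrib, Finset.sum_const, Nat.card_Ico,
      S_sub s hin, nsmul_eq_mul]
  rw [hsplit, h1, h2, h3, S_zero]
  have hb'le : (b' : Int) ≤ (i : Int) + 1 := by exact_mod_cast hb'i
  have hcast1 : ((i + 1 - b' : Nat) : Int) = (i : Int) + 1 - (b' : Int) := by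
    push_cast [Nat.cast_sub hb'i]; ring
  have hcast2 : ((s.length - (i + 1) : Nat) : Int) = (s.length : Int) - (i : Int) - 1 := by
    push_cast [Nat.cast_sub hin]; ring
  rw [hcast1, hcast2]
  ring

-- closed form of FA (pure algebra)
theorem FA_closed (s : List Int) (i : Nat) :
    FA s i = 2 * S s (cntLt s (s.getD i 0)) - 2 * S s (i + 1) + S s s.length
      + s.getD i 0 * ((i : Int) + 1 - (cntLt s (s.getD i 0) : Int))
      - s.getD i 0 * ((s.length : Int) - (i : Int) - 1) := by
  unfold FA
  rw [S_zero]
  ring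

-- pointwise: A's cost never exceeds B's (they differ by a sum of nonpositive terms)
theorem FA_le_FB (s : List Int) (hs : s.Pairwise (· ≤ ·)) (i : Nat) (hi : i < s.length) :
    FA s i ≤ FB s i := by
  rw [FA_closed, FB_closed s hs i hi]
  by_cases hble : cntLt s (s.getD i 0) ≤ i + 1
  · rw [min_eq_left hble]
  · have hgt : i + 1 < cntLt s (s.getD i 0) := not_le.1 hble
    have hbn : cntLt s (s.getD i 0) ≤ s.length := cntLt_le_length s _
    rw [min_eq_right (by omega)]
    have hsum : ∑ j ∈ Finset.Ico (i + 1) (cntLt s (s.getD i 0)),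
        (2 * s.getD j 0 - s.getD i 0) ≤ 0 := by
      apply Finset.sum_nonpos
      intro j hj
      simp only [Finset.mem_Ico] at hj
      have := cntLt_pred s (s.getD i 0) j hj.2
      omega
    have hsplit : ∑ j ∈ Finset.Ico (i + 1) (cntLt s (s.getD i 0)),
        (2 * s.getD j 0 - s.getD i 0)
        = 2 * (S s (cntLt s (s.getD i 0)) - S s (i + 1))
          - ((cntLt s (s.getD i 0) - (i + 1) : Nat) : Int) * s.getD i 0 := by
      rw [Finset.sum_sub_distrib, ← Finset.mul_sum, ← S_sub s (by omega),
        Finset.sum_const, Nat.card_Ico, nsmul_eq_mul]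
    have hcast : ((cntLt s (s.getD i 0) - (i + 1) : Nat) : Int)
        = (cntLt s (s.getD i 0) : Int) - (i : Int) - 1 := by omega
    rw [hcast] at hsplit
    push_cast
    nlinarith [hsum, hsplit]

-- every A-cost is matched by some B-cost not above it
theorem FB_exists_le (s : List Int) (hs : s.Pairwise (· ≤ ·)) (i : Nat) (hi : i < s.length) :
    ∃ i', i' < s.length ∧ FB s i' ≤ FA s i := by
  by_cases hble : cntLt s (s.getD i 0) ≤ i + 1
  · refine ⟨i, hi, le_of_eq ?_⟩
    rw [FB_closed s hs i hi, FA_closed, min_eq_left hble]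
  · have hgt : i + 1 < cntLt s (s.getD i 0) := not_le.1 hble
    have hbn : cntLt s (s.getD i 0) ≤ s.length := cntLt_le_length s _
    refine ⟨cntLt s (s.getD i 0) - 1, by omega, ?_⟩
    have hc' : s.getD i 0 ≤ s.getD (cntLt s (s.getD i 0) - 1) 0 :=
      sorted_getD_mono hs (by omega) (by omega)
    have hcnt' : cntLt s (s.getD i 0) ≤ cntLt s (s.getD (cntLt s (s.getD i 0) - 1) 0) :=
      cntLt_ge s _ _ hbn
        (fun j hj => lt_of_lt_of_le (cntLt_pred s _ j hj) hc')
    rw [FB_closed s hs _ (by omega), FA_closed]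
    rw [min_eq_right (by omega)]
    have hb1 : cntLt s (s.getD i 0) - 1 + 1 = cntLt s (s.getD i 0) := by omega
    rw [hb1]
    have hX : ((cntLt s (s.getD i 0) - (i + 1) : Nat) : Int) * s.getD i 0
        ≤ S s (cntLt s (s.getD i 0)) - S s (i + 1) := by
      rw [S_sub s (by omega)]
      have hle := Finset.sum_le_sum (s := Finset.Ico (i + 1) (cntLt s (s.getD i 0)))
        (f := fun _ => s.getD i 0) (g := fun j => s.getD j 0)
        (by
          intro j hj
          simp only [Finset.mem_Ico] at hj
          exact sorted_getD_mono hs (by omega) (by omega))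
      simpa [Finset.sum_const, Nat.card_Ico, nsmul_eq_mul] using hle
    have hcast : ((cntLt s (s.getD i 0) - (i + 1) : Nat) : Int)
        = (cntLt s (s.getD i 0) : Int) - (i : Int) - 1 := by omega
    have hcast2 : ((cntLt s (s.getD i 0) - 1 : Nat) : Int)
        = (cntLt s (s.getD i 0) : Int) - 1 := by omega
    rw [hcast] at hX
    rw [hcast2]
    have hbn' : (cntLt s (s.getD i 0) : Int) ≤ (s.length : Int) := by exact_mod_cast hbn
    nlinarith [hX, mul_nonneg (sub_nonneg.2 hc') (sub_nonneg.2 hbn')]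

-- (map . sum) over a range is a Finset sum
theorem sum_map_range (g : Nat → Int) (n : Nat) :
    ((List.range n).map g).sum = ∑ j ∈ Finset.range n, g j := by
  induction n with
  | zero => simp
  | succ n ih =>
    rw [List.range_succ, List.map_append, List.sum_append, Finset.sum_range_succ, ih]
    simp

-- B's program computes foldl-min of FB
theorem bridgeB (s : List Int) :
    (PySem.List.enumerate s).foldl (fun best ic =>
        min best (((PySem.List.enumerate s).map (fun jx =>
          if jx.1 ≤ ic.1 then min jx.2 (ic.2 - jx.2) else jx.2 - ic.2)).sum)) s.sum
    = List.foldl (fun m i => min m (FB s i)) (S s s.length) (List.range s.length) := by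
  rw [PySem.List.enumerate_eq_map_pyRange (d := 0), PySem.List.pyRange_one]
  simp only [PySem.List.len_eq, sub_zero, Int.toNat_natCast, List.map_map, List.foldl_map]
  rw [← S_length s]
  congr 1
  funext m j
  congr 1
  unfold FB
  rw [← sum_map_range]
  congr 1
  apply List.map_congr_left
  intro k _
  simp

theorem f_spec : Claim_equal_f := by
  intro arr _
  unfold Spec_f
  simp only [f, f_alt]
  set s := PySem.List.sorted arr (fun x => x) false with hsdef
  have hs : s.Pairwise (· ≤ ·) := by
    simpa using PySem.List.sorted_pairwise (xs := arr) (key := fun x => x)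
  have hP : ∀ k, k ≤ s.length →
      ((List.range' 1 s.length).foldl
        (fun p i => p ++ [p.getD (i - 1) 0 + s.getD (i - 1) 0]) [0]).getD k 0 = S s k := by
    intro k hk
    rw [prefA_eq s s.length le_rfl]
    exact getD_map_range_S s s.length k hk
  rw [bridgeB s, List.range_eq_range']
  rw [loopA s _ hs hP s.length 0 0 _ (by omega) (Or.inr (Nat.zero_le _))]
  rw [hP s.length le_rfl, hP 0 (by omega), S_zero, sub_zero, ← List.range_eq_range']
  exact foldl_min_eq (FA s) (FB s) _ _
    (fun i hi => FA_le_FB s hs i (List.mem_range.1 hi))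
    (fun i hi => by
      obtain ⟨i2, h1, h2⟩ := FB_exists_le s hs i (List.mem_range.1 hi)
      exact ⟨i2, List.mem_range.2 h1, h2⟩)
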